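-- pv_equiv track=rewrite | github.com/geoSkogen/python2_workbook | game_of_nodes/avgtime_recurtest1.py | exponentiate
-- ===== SOURCE A (Python) =====
-- def exponentiate (int1, int2) :
--     results = []
--     int1_scores = []
--     int2_scores = []
--     reps = int2 - int1
--
--     for i in range(reps) :
--         int1_scores.append(int1**i+1)
--         int2_scores.append(int2**i+1)
--
--     results.append(int1_scores)
--     results.append(int2_scores)
--
--     return results
-- ===== SOURCE B (Python) =====
-- def exponentiate(int1, int2):
--     reps = int2 - int1
--     n = reps if reps > 0 else 0
--     s1 = [0] * n
--     s2 = [0] * n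
--     p1 = p2 = 1
--     for k in range(n):
--         s1[k] = p1 + 1
--         s2[k] = p2 + 1
--         p1 *= int1
--         p2 *= int2
--     return [s1, s2]
-- ===== Notes on version B (the rewrite author's own statement) =====
-- stated objective: alternative
-- what changed: B maintains the running powers incrementally (one multiply per iteration, writing into preallocated lists) instead of recomputing int1**i and int2**i from scratch at every index.
import Mathlib
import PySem

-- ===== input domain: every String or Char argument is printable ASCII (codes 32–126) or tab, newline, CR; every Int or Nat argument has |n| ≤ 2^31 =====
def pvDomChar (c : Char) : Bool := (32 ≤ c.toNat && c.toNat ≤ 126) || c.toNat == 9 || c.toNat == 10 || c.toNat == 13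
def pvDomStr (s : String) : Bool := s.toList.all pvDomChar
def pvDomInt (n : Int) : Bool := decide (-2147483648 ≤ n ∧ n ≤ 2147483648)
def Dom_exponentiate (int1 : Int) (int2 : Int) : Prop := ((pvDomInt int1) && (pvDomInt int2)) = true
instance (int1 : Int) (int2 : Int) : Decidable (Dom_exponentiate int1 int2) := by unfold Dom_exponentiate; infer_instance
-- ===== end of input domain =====

-- B maintains the running powers incrementally (one multiplication per step) instead of
-- recomputing int1**i and int2**i at every index: an alternative single-multiply-per-step loop.


-- ===== PORT A =====
-- for i in range(reps): append int1**i+1 and int2**i+1 (i is always ≥ 0 inside the range)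
def exponentiate (int1 : Int) (int2 : Int) : List (List Int) :=
  let reps := int2 - int1
  let st := (PySem.List.pyRange 0 reps 1).foldl
    (fun (acc : List Int × List Int) i =>
      (acc.1 ++ [int1 ^ i.toNat + 1], acc.2 ++ [int2 ^ i.toNat + 1]))
    ([], [])
  [st.1, st.2]

-- ===== PORT B =====
-- Source B's loop: running powers p1, p2, one multiply each per step, lists built in order
def expGo (b1 b2 : Int) : Nat → Int → Int → List Int × List Int
  | 0, _, _ => ([], [])
  | n + 1, p1, p2 =>
      let r := expGo b1 b2 n (p1 * b1) (p2 * b2)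
      ((p1 + 1) :: r.1, (p2 + 1) :: r.2)

def exponentiate_alt (int1 : Int) (int2 : Int) : List (List Int) :=
  let reps := int2 - int1
  let r := expGo int1 int2 reps.toNat 1 1
  [r.1, r.2]

-- ===== PRECONDITION & SPEC =====
def Spec_exponentiate (int1 : Int) (int2 : Int) (out : List (List Int)) : Prop := out = exponentiate_alt int1 int2
instance (int1 : Int) (int2 : Int) (out : List (List Int)) : Decidable (Spec_exponentiate int1 int2 out) := by unfold Spec_exponentiate; infer_instance

-- ===== CLAIM (what is proved, stated in full; the proofs are below) =====
def Claim_equal_exponentiate : Prop := ∀ (int1 : Int) (int2 : Int), Dom_exponentiate int1 int2 → Spec_exponentiate int1 int2 (exponentiate int1 int2)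

-- ===== LEMMAS AND PROOFS =====

-- A's loop, characterised: the append-fold is map
theorem exp_foldl_char (b1 b2 : Int) (l : List Int) (a b : List Int) :
    l.foldl (fun (acc : List Int × List Int) i =>
        (acc.1 ++ [b1 ^ i.toNat + 1], acc.2 ++ [b2 ^ i.toNat + 1])) (a, b)
    = (a ++ l.map (fun i => b1 ^ i.toNat + 1), b ++ l.map (fun i => b2 ^ i.toNat + 1)) := by
  induction l generalizing a b with
  | nil => simp
  | cons x xs ih => simp [List.foldl_cons, ih]

-- B's loop, characterised: running powers give p * b^k + 1
theorem expGo_char (b1 b2 : Int) (n : Nat) : ∀ (p1 p2 : Int),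
    expGo b1 b2 n p1 p2
    = ((List.range n).map (fun k => p1 * b1 ^ k + 1),
       (List.range n).map (fun k => p2 * b2 ^ k + 1)) := by
  induction n with
  | zero => intro p1 p2; simp [expGo]
  | succ n ih =>
      intro p1 p2
      simp only [expGo, ih, List.range_succ_eq_map, List.map_cons, List.map_map]
      refine Prod.ext ?_ ?_ <;>
        · simp only [pow_zero, mul_one]
          refine congrArg₂ List.cons rfl (List.map_congr_left (fun k _ => ?_))
          simp [Function.comp, pow_succ]; ring

-- ===== VERDICT (by name: the statement is the Claim_ definition above) =====
theorem exponentiate_spec : Claim_equal_exponentiate := by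
  intro int1 int2 _
  unfold Spec_exponentiate exponentiate exponentiate_alt
  simp only [PySem.List.pyRange_one, zero_add, exp_foldl_char, expGo_char, List.map_map,
    List.nil_append, one_mul, Int.sub_zero]
  refine congrArg₂ (fun x y => [x, y]) ?_ ?_ <;>
    exact List.map_congr_left (fun k _ => by simp)
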